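-- pv_equiv track=rewrite | github.com/ahmadsh2007/CompetitiveProgramming | local contests/PSUT Marathon 2026/MultiThreadStressTestingCodeForI_TheHillClimbingTestCaseGenerator.py | get_next_state
-- ===== SOURCE A (Python) =====
-- def get_next_state(a):
--     n = len(a)
--     p_min = a[:]
--     for i in range(1, n):
--         if p_min[i-1] < p_min[i]: p_min[i] = p_min[i-1]
--
--     s_max = a[:]
--     for i in range(n-2, -1, -1):
--         if s_max[i+1] > s_max[i]: s_max[i] = s_max[i+1]
--
--     return [p_min[i] ^ s_max[i] for i in range(n)]
-- ===== SOURCE B (Python) =====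
-- def get_next_state(a):
--     # Divide and conquer: for the segment xs, with mn = min of everything to its
--     # left (or None) and mx = max of everything to its right (or None), produce
--     # [prefix_min ^ suffix_max] for every position of xs.  A node scans its left
--     # half for its min and its right half for its max (built-in min/max) and
--     # recurses; no prefix-min or suffix-max arrays are ever built.
--     def cmin(m, x):
--         return x if m is None or x < m else m
--
--     def cmax(m, x):
--         return x if m is None or x > m else m
--
--     def go(xs, mn, mx):
--         if not xs:
--             return []
--         if len(xs) == 1:
--             x = xs[0]
--             return [cmin(mn, x) ^ cmax(mx, x)]
--         h = len(xs) // 2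
--         L, R = xs[:h], xs[h:]
--         return go(L, mn, cmax(mx, max(R))) + go(R, cmin(mn, min(L)), mx)
--
--     return go(a, None, None)
-- ===== Notes on version B (the rewrite author's own statement) =====
-- stated objective: alternative
-- what changed: Replaced A's three linear array passes (in-place prefix-min rewrite, in-place suffix-max rewrite, XOR comprehension) by a divide-and-conquer recursion: each node splits the list in half, computes the left half's min and the right half's max with the built-ins, threads them as carries into the recursive calls, and a leaf emits its single XOR directly; no prefix-min or suffix-max array is ever materialised.
import Mathlib
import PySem

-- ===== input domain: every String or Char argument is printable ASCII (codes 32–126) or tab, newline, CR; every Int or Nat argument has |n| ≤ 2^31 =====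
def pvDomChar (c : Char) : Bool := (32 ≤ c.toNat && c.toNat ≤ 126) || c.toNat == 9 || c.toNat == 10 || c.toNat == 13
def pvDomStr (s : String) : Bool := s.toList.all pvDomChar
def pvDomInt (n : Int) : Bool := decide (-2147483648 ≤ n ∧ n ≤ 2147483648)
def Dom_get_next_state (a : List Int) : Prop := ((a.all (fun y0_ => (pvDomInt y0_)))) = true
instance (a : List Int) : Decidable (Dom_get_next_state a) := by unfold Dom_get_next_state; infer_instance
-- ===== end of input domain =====

-- B replaces A's three linear array passes by a divide-and-conquer recursion that
-- threads a left-min and right-max carry into each half and emits the XOR at the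
-- leaves (alternative algorithm; O(n log n) vs A's O(n), not faster).


-- ===== PORT A =====
def get_next_state (a : List Int) : List Int :=
  let n : Int := a.length
  let p_min := (PySem.List.pyRange 1 n 1).foldl (fun p i =>
    if PySem.List.pyGetD p (i - 1) 0 < PySem.List.pyGetD p i 0
    then PySem.List.pySetD p i (PySem.List.pyGetD p (i - 1) 0) else p) a
  let s_max := (PySem.List.pyRange (n - 2) (-1) (-1)).foldl (fun s i =>
    if PySem.List.pyGetD s (i + 1) 0 > PySem.List.pyGetD s i 0
    then PySem.List.pySetD s i (PySem.List.pyGetD s (i + 1) 0) else s) a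
  (PySem.List.pyRange 0 n 1).map (fun i =>
    PySem.Int.bxor (PySem.List.pyGetD p_min i 0) (PySem.List.pyGetD s_max i 0))

-- ===== PORT B =====
-- cmin(m, x): x if m is None or x < m else m
def pvCmin : Option Int → Int → Int
  | none, x => x
  | some m, x => if x < m then x else m

-- cmax(m, x): x if m is None or x > m else m
def pvCmax : Option Int → Int → Int
  | none, x => x
  | some m, x => if x > m then x else m

-- go(xs, mn, mx); xs[:h] / xs[h:] with 0 ≤ h ≤ len(xs) are exactly take/drop;
-- Python's max(R) / min(L) are PySem.List.max?/min? with the identity key (R, L nonempty here).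
def pvGo (xs : List Int) (mn mx : Option Int) : List Int :=
  match xs with
  | [] => []
  | [x] => [PySem.Int.bxor (pvCmin mn x) (pvCmax mx x)]
  | x :: y :: t =>
    let h := (x :: y :: t).length / 2
    let L := (x :: y :: t).take h
    let R := (x :: y :: t).drop h
    pvGo L mn (some (pvCmax mx ((PySem.List.max? R (fun v => v)).getD 0))) ++
      pvGo R (some (pvCmin mn ((PySem.List.min? L (fun v => v)).getD 0))) mx
termination_by xs.length
decreasing_by
  · simp only [List.length_take, List.length_cons]; omega
  · simp only [List.length_drop, List.length_cons]; omega

def get_next_state_alt (a : List Int) : List Int := pvGo a none none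

-- ===== PRECONDITION & SPEC =====
def Spec_get_next_state (a : List Int) (out : List Int) : Prop := out = get_next_state_alt a
instance (a : List Int) (out : List Int) : Decidable (Spec_get_next_state a out) := by unfold Spec_get_next_state; infer_instance

-- ===== CLAIM (what is proved, stated in full; the proofs are below) =====
def Claim_equal_get_next_state : Prop := ∀ (a : List Int), Dom_get_next_state a → Spec_get_next_state a (get_next_state a)

-- ===== LEMMAS AND PROOFS =====

-- forward scan of running minima and its final carry (proof-side mirrors of A's p_min)
def pvScanMin : List Int → Option Int → List Int
  | [], _ => []
  | x :: xs, c => pvCmin c x :: pvScanMin xs (some (pvCmin c x))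

def pvCarryMin : List Int → Option Int → Option Int
  | [], c => c
  | x :: xs, c => pvCarryMin xs (some (pvCmin c x))

-- suffix maxima, head-recursive (mirror of A's s_max)
def pvSufMax : List Int → List Int
  | [] => []
  | x :: xs =>
    let s := pvSufMax xs
    (match s.head? with | none => x | some m => if m > x then m else x) :: s

-- option-valued max of xs combined with a right carry
def pvMaxO (xs : List Int) (c : Option Int) : Option Int :=
  xs.foldr (fun x acc => some (pvCmax acc x)) c

-- suffix maxima with a right carry
def pvSufMaxC : List Int → Option Int → List Int
  | [], _ => []
  | x :: xs, c => pvCmax (pvMaxO xs c) x :: pvSufMaxC xs c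

theorem pvCmin_some (m z : Int) : pvCmin (some m) z = min m z := by
  simp only [pvCmin, Int.min_def]; split_ifs <;> omega

theorem pvCmax_some (m z : Int) : pvCmax (some m) z = max m z := by
  simp only [pvCmax, Int.max_def]; split_ifs <;> omega

theorem length_pvScanMin (xs : List Int) (c : Option Int) : (pvScanMin xs c).length = xs.length := by
  induction xs generalizing c with
  | nil => rfl
  | cons x xs ih => simp [pvScanMin, ih]

theorem length_pvSufMax (xs : List Int) : (pvSufMax xs).length = xs.length := by
  induction xs with
  | nil => rfl
  | cons x xs ih => simp [pvSufMax, ih]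

theorem length_pvSufMaxC (xs : List Int) (c : Option Int) : (pvSufMaxC xs c).length = xs.length := by
  induction xs with
  | nil => rfl
  | cons x xs ih => simp [pvSufMaxC, ih]

theorem pvScanMin_append (xs ys : List Int) (c : Option Int) :
    pvScanMin (xs ++ ys) c = pvScanMin xs c ++ pvScanMin ys (pvCarryMin xs c) := by
  induction xs generalizing c with
  | nil => rfl
  | cons x xs ih => simp only [List.cons_append, pvScanMin, pvCarryMin, ih]

theorem pvMaxO_append (xs ys : List Int) (c : Option Int) :
    pvMaxO (xs ++ ys) c = pvMaxO xs (pvMaxO ys c) := by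
  simp [pvMaxO, List.foldr_append]

theorem pvSufMaxC_append (xs ys : List Int) (c : Option Int) :
    pvSufMaxC (xs ++ ys) c = pvSufMaxC xs (pvMaxO ys c) ++ pvSufMaxC ys c := by
  induction xs with
  | nil => rfl
  | cons x xs ih => simp only [List.cons_append, pvSufMaxC, pvMaxO_append, ih]

theorem pvMaxO_none_eq_head? (xs : List Int) :
    pvMaxO xs none = (pvSufMax xs).head? := by
  induction xs with
  | nil => rfl
  | cons x xs ih =>
    simp only [pvMaxO, List.foldr_cons, pvSufMax, List.head?_cons]
    rw [show xs.foldr (fun x acc => some (pvCmax acc x)) none = pvMaxO xs none from rfl, ih]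
    cases (pvSufMax xs).head? with
    | none => rfl
    | some m => simp only [pvCmax]; congr 1; split_ifs <;> omega

theorem pvSufMaxC_none (xs : List Int) : pvSufMaxC xs none = pvSufMax xs := by
  induction xs with
  | nil => rfl
  | cons x xs ih =>
    simp only [pvSufMaxC, pvSufMax, ih, pvMaxO_none_eq_head?]
    cases (pvSufMax xs).head? with
    | none => rfl
    | some m => simp only [pvCmax]; congr 1; split_ifs <;> omega

-- running fold lemmas linking the built-ins min/max to the carries
theorem foldl_min_pull (t : List Int) (m x : Int) :
    t.foldl min (min m x) = min m (t.foldl min x) := by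
  induction t generalizing x with
  | nil => rfl
  | cons y t ih => simp only [List.foldl_cons, min_assoc, ih]

theorem foldl_max_pull (t : List Int) (m x : Int) :
    t.foldl max (max m x) = max m (t.foldl max x) := by
  induction t generalizing x with
  | nil => rfl
  | cons y t ih => simp only [List.foldl_cons, max_assoc, ih]

theorem pvCarryMin_some (t : List Int) (s : Int) :
    pvCarryMin t (some s) = some (t.foldl min s) := by
  induction t generalizing s with
  | nil => rfl
  | cons y t ih => simp only [pvCarryMin, pvCmin_some, List.foldl_cons, ih]

theorem pvCarryMin_cons (x : Int) (t : List Int) (mn : Option Int) :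
    pvCarryMin (x :: t) mn = some (pvCmin mn (t.foldl min x)) := by
  simp only [pvCarryMin, pvCarryMin_some]
  cases mn with
  | none => simp [pvCmin]
  | some m => simp only [pvCmin_some, foldl_min_pull]

theorem pvMaxO_cons (x : Int) (t : List Int) (mx : Option Int) :
    pvMaxO (x :: t) mx = some (pvCmax mx (t.foldl max x)) := by
  induction t generalizing x with
  | nil =>
    cases mx with
    | none => simp [pvMaxO, pvCmax]
    | some m => simp [pvMaxO, pvCmax_some, max_comm]
  | cons y t ih =>
    have h1 : pvMaxO (x :: y :: t) mx = some (pvCmax (pvMaxO (y :: t) mx) x) := rfl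
    rw [h1, ih]
    cases mx with
    | none =>
      simp only [List.foldl_cons, foldl_max_pull, pvCmax]
      congr 1
      rw [Int.max_def]; split_ifs <;> omega
    | some m =>
      simp only [pvCmax_some, List.foldl_cons, foldl_max_pull]
      rw [max_right_comm, max_assoc]

-- the carry passed to the right recursive call is the forward-scan carry over L
theorem carry_of_minL (x : Int) (t : List Int) (mn : Option Int) :
    some (pvCmin mn ((PySem.List.min? (x :: t) (fun v => v)).getD 0)) = pvCarryMin (x :: t) mn := by
  rw [PySem.List.min?_id_cons, Option.getD_some, pvCarryMin_cons]

-- the carry passed to the left recursive call is pvMaxO over R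
theorem carry_of_maxR (x : Int) (t : List Int) (mx : Option Int) :
    some (pvCmax mx ((PySem.List.max? (x :: t) (fun v => v)).getD 0)) = pvMaxO (x :: t) mx := by
  rw [PySem.List.max?_id_cons, Option.getD_some, pvMaxO_cons]

-- B's divide and conquer computes zipWith bxor of the forward scan and carried suffix maxima
theorem pvGo_eq_aux (n : Nat) : ∀ (xs : List Int) (mn mx : Option Int), xs.length ≤ n →
    pvGo xs mn mx = List.zipWith PySem.Int.bxor (pvScanMin xs mn) (pvSufMaxC xs mx) := by
  induction n with
  | zero =>
    intro xs mn mx h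
    have : xs = [] := List.eq_nil_of_length_eq_zero (by omega)
    subst this; simp [pvGo, pvScanMin, pvSufMaxC]
  | succ n ih =>
    intro xs mn mx h
    match xs with
    | [] => simp [pvGo, pvScanMin, pvSufMaxC]
    | [x] =>
      simp [pvGo, pvScanMin, pvSufMaxC, pvMaxO]
    | x :: y :: t =>
      rw [pvGo]
      set h2 := (x :: y :: t).length / 2 with hh
      have hlen : (x :: y :: t).length = t.length + 2 := by simp
      have hge : 1 ≤ h2 := by omega
      have hlt : h2 < (x :: y :: t).length := by omega
      have hLlen : ((x :: y :: t).take h2).length = h2 := by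
        simp only [List.length_take]; omega
      have hRlen : ((x :: y :: t).drop h2).length = (x :: y :: t).length - h2 := by
        simp [List.length_drop]
      obtain ⟨l0, L', hL⟩ : ∃ l0 L', (x :: y :: t).take h2 = l0 :: L' := by
        cases hv : (x :: y :: t).take h2 with
        | nil => rw [hv] at hLlen; simp at hLlen; omega
        | cons a b => exact ⟨a, b, rfl⟩
      obtain ⟨r0, R', hR⟩ : ∃ r0 R', (x :: y :: t).drop h2 = r0 :: R' := by
        cases hv : (x :: y :: t).drop h2 with
        | nil => rw [hv] at hRlen; simp at hRlen; omega
        | cons a b => exact ⟨a, b, rfl⟩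
      rw [hL, hR, carry_of_minL, carry_of_maxR,
        ih _ _ _ (by rw [← hL]; rw [hLlen]; omega),
        ih _ _ _ (by rw [← hR]; rw [hRlen]; omega),
        ← hL, ← hR]
      conv_rhs => rw [show (x :: y :: t) = (x :: y :: t).take h2 ++ (x :: y :: t).drop h2 from
        (List.take_append_drop _ _).symm]
      rw [pvScanMin_append, pvSufMaxC_append,
        List.zipWith_append (by rw [length_pvScanMin, length_pvSufMaxC])]

theorem pvGo_eq (xs : List Int) (mn mx : Option Int) :
    pvGo xs mn mx = List.zipWith PySem.Int.bxor (pvScanMin xs mn) (pvSufMaxC xs mx) :=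
  pvGo_eq_aux xs.length xs mn mx (le_refl _)

-- A's forward loop invariant
theorem pvCarryMin_eq_getLast? (xs : List Int) (c : Option Int) (h : xs ≠ []) :
    pvCarryMin xs c = (pvScanMin xs c).getLast? := by
  induction xs generalizing c with
  | nil => simp at h
  | cons x xs ih =>
    cases xs with
    | nil => rfl
    | cons y ys =>
      show pvCarryMin (y :: ys) (some (pvCmin c x)) = _
      rw [ih _ (by simp)]
      show _ = (pvCmin c x :: pvScanMin (y :: ys) (some (pvCmin c x))).getLast?
      rw [show pvScanMin (y :: ys) (some (pvCmin c x))
          = pvCmin (some (pvCmin c x)) y :: pvScanMin ys (some (pvCmin (some (pvCmin c x)) y)) from rfl]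
      exact (List.getLast?_cons_cons).symm

theorem pminLoop (a : List Int) (k : Nat) (h1 : 1 ≤ k) (h2 : k ≤ a.length) :
    (PySem.List.pyRange (k : Int) (a.length : Int) 1).foldl (fun p i =>
      if PySem.List.pyGetD p (i - 1) 0 < PySem.List.pyGetD p i 0
      then PySem.List.pySetD p i (PySem.List.pyGetD p (i - 1) 0) else p)
      (pvScanMin (a.take k) none ++ a.drop k)
    = pvScanMin a none := by
  rcases eq_or_lt_of_le h2 with heq | hlt
  · rw [PySem.List.pyRange_one_eq_nil (by exact_mod_cast le_of_eq heq.symm)]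
    rw [List.foldl_nil, heq, List.take_length, List.drop_length, List.append_nil]
  · have hcons : PySem.List.pyRange (k : Int) (a.length : Int) 1
        = (k : Int) :: PySem.List.pyRange ((k : Int) + 1) (a.length : Int) 1 :=
      PySem.List.pyRange_one_cons (by exact_mod_cast hlt)
    rw [hcons, List.foldl_cons]
    have hL : (pvScanMin (a.take k) none).length = k := by
      rw [length_pvScanMin, List.length_take]; omega
    have hx : a.drop k = a[k] :: a.drop (k + 1) := List.drop_eq_getElem_cons hlt
    have hne : a.take k ≠ [] := by
      have hlen : (a.take k).length = k := by rw [List.length_take]; omega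
      intro hnil; rw [hnil] at hlen; simp at hlen; omega
    have hkm : k - 1 < (pvScanMin (a.take k) none).length := by rw [hL]; omega
    have hget1 : PySem.List.pyGetD (pvScanMin (a.take k) none ++ a.drop k) ((k : Int) - 1) 0
        = (pvScanMin (a.take k) none)[k - 1] := by
      have hcast : ((k : Int) - 1) = ((k - 1 : Nat) : Int) := by omega
      rw [hcast, PySem.List.pyGetD_natCast, List.getD_eq_getElem?_getD,
        List.getElem?_append_left hkm, List.getElem?_eq_getElem hkm, Option.getD_some]
    have hget2 : PySem.List.pyGetD (pvScanMin (a.take k) none ++ a.drop k) (k : Int) 0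
        = a[k] := by
      rw [PySem.List.pyGetD_natCast, List.getD_eq_getElem?_getD,
        List.getElem?_append_right (by omega), hL, Nat.sub_self, hx,
        List.getElem?_cons_zero, Option.getD_some]
    have hcarry : pvCarryMin (a.take k) none = some ((pvScanMin (a.take k) none)[k - 1]) := by
      rw [pvCarryMin_eq_getLast? _ _ hne, List.getLast?_eq_getElem?, hL,
        List.getElem?_eq_getElem hkm]
    have htake : a.take (k + 1) = a.take k ++ [a[k]] := by
      rw [List.take_add_one, List.getElem?_eq_getElem hlt]; rfl
    have hstep :
        (if PySem.List.pyGetD (pvScanMin (a.take k) none ++ a.drop k) ((k : Int) - 1) 0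
              < PySem.List.pyGetD (pvScanMin (a.take k) none ++ a.drop k) (k : Int) 0
         then PySem.List.pySetD (pvScanMin (a.take k) none ++ a.drop k) (k : Int)
                (PySem.List.pyGetD (pvScanMin (a.take k) none ++ a.drop k) ((k : Int) - 1) 0)
         else pvScanMin (a.take k) none ++ a.drop k)
        = pvScanMin (a.take (k + 1)) none ++ a.drop (k + 1) := by
      rw [hget1, hget2, htake, pvScanMin_append, hcarry]
      rw [show pvScanMin [a[k]] (some ((pvScanMin (a.take k) none)[k - 1]))
          = [pvCmin (some ((pvScanMin (a.take k) none)[k - 1])) a[k]] from rfl]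
      simp only [pvCmin, PySem.List.pySetD_natCast, List.set_append, hL, Nat.lt_irrefl,
        if_false, Nat.sub_self, hx, List.set_cons_zero, List.append_assoc, List.singleton_append]
      by_cases hc : (pvScanMin (a.take k) none)[k - 1] < a[k]
      · rw [if_pos hc, if_neg (by omega)]
      · rw [if_neg hc]
        by_cases hc2 : a[k] < (pvScanMin (a.take k) none)[k - 1]
        · rw [if_pos hc2]
        · rw [if_neg hc2]
          have heqv : (pvScanMin (a.take k) none)[k - 1] = a[k] := by omega
          rw [heqv]
    rw [hstep]
    have hone : ((k : Int) + 1) = ((k + 1 : Nat) : Int) := by omega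
    rw [hone]
    exact pminLoop a (k + 1) (by omega) (by omega)
termination_by a.length - k

-- A's backward loop invariant
theorem smaxLoop (a : List Int) (i : Nat) (h : i + 2 ≤ a.length) :
    (PySem.List.pyRange (i : Int) (-1) (-1)).foldl (fun s j =>
      if PySem.List.pyGetD s (j + 1) 0 > PySem.List.pyGetD s j 0
      then PySem.List.pySetD s j (PySem.List.pyGetD s (j + 1) 0) else s)
      (a.take (i + 1) ++ pvSufMax (a.drop (i + 1)))
    = pvSufMax a := by
  have hcons : PySem.List.pyRange (i : Int) (-1) (-1)
      = (i : Int) :: PySem.List.pyRange ((i : Int) - 1) (-1) (-1) :=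
    PySem.List.pyRange_neg_one_cons (by omega)
  rw [hcons, List.foldl_cons]
  have hT : (a.take (i + 1)).length = i + 1 := by rw [List.length_take]; omega
  have hd1 : i + 1 < a.length := by omega
  have hSne : pvSufMax (a.drop (i + 1)) ≠ [] := by
    intro hh; have := congrArg List.length hh
    rw [length_pvSufMax] at this; simp [List.length_drop] at this; omega
  obtain ⟨m, S', hSm⟩ : ∃ m S', pvSufMax (a.drop (i + 1)) = m :: S' := by
    cases hval : pvSufMax (a.drop (i + 1)) with
    | nil => exact absurd hval hSne
    | cons m S' => exact ⟨m, S', rfl⟩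
  have hilt : i < a.length := by omega
  have htake : a.take (i + 1) = a.take i ++ [a[i]] := by
    rw [List.take_add_one, List.getElem?_eq_getElem hilt]; rfl
  have hget1 : PySem.List.pyGetD (a.take (i + 1) ++ pvSufMax (a.drop (i + 1))) ((i : Int) + 1) 0
      = m := by
    have hcast : ((i : Int) + 1) = ((i + 1 : Nat) : Int) := by omega
    rw [hcast, PySem.List.pyGetD_natCast, List.getD_eq_getElem?_getD,
      List.getElem?_append_right (by omega), hT, Nat.sub_self, hSm,
      List.getElem?_cons_zero, Option.getD_some]
  have hii : i < (a.take (i + 1)).length := by omega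
  have hget2 : PySem.List.pyGetD (a.take (i + 1) ++ pvSufMax (a.drop (i + 1))) (i : Int) 0
      = a[i] := by
    rw [PySem.List.pyGetD_natCast, List.getD_eq_getElem?_getD,
      List.getElem?_append_left hii, List.getElem?_take_of_lt (by omega),
      List.getElem?_eq_getElem hilt, Option.getD_some]
  have hsuf : pvSufMax (a.drop i) = (if m > a[i] then m else a[i]) :: pvSufMax (a.drop (i + 1)) := by
    have hdi : a.drop i = a[i] :: a.drop (i + 1) := List.drop_eq_getElem_cons hilt
    rw [hdi, pvSufMax, hSm]
    simp only [List.head?_cons]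
  have hstep :
      (if PySem.List.pyGetD (a.take (i + 1) ++ pvSufMax (a.drop (i + 1))) ((i : Int) + 1) 0
            > PySem.List.pyGetD (a.take (i + 1) ++ pvSufMax (a.drop (i + 1))) (i : Int) 0
       then PySem.List.pySetD (a.take (i + 1) ++ pvSufMax (a.drop (i + 1))) (i : Int)
              (PySem.List.pyGetD (a.take (i + 1) ++ pvSufMax (a.drop (i + 1))) ((i : Int) + 1) 0)
       else a.take (i + 1) ++ pvSufMax (a.drop (i + 1)))
      = a.take i ++ pvSufMax (a.drop i) := by
    rw [hget1, hget2, hsuf]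
    by_cases hc : m > a[i]
    · rw [if_pos hc, if_pos hc, PySem.List.pySetD_natCast, List.set_append,
        if_pos (by omega), htake, List.set_append, if_neg (by rw [List.length_take]; omega)]
      have hz : i - (a.take i).length = 0 := by rw [List.length_take]; omega
      rw [hz, List.set_cons_zero, List.append_assoc, List.singleton_append]
    · rw [if_neg hc, if_neg hc, htake, List.append_assoc, List.singleton_append]
  rw [hstep]
  cases i with
  | zero =>
    rw [show ((0 : Nat) : Int) - 1 = (-1 : Int) by omega,
      PySem.List.pyRange_neg_one_eq_nil (by omega), List.foldl_nil]
    simp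
  | succ j =>
    rw [show ((j + 1 : Nat) : Int) - 1 = ((j : Nat) : Int) by omega]
    exact smaxLoop a j (by omega)
termination_by i

theorem pmin_fold (a : List Int) :
    (PySem.List.pyRange 1 (a.length : Int) 1).foldl (fun p i =>
      if PySem.List.pyGetD p (i - 1) 0 < PySem.List.pyGetD p i 0
      then PySem.List.pySetD p i (PySem.List.pyGetD p (i - 1) 0) else p) a
    = pvScanMin a none := by
  cases a with
  | nil => rfl
  | cons x xs =>
    have := pminLoop (x :: xs) 1 (le_refl 1) (by simp)
    simpa [pvScanMin, pvCmin] using this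

theorem smax_fold (a : List Int) :
    (PySem.List.pyRange ((a.length : Int) - 2) (-1) (-1)).foldl (fun s j =>
      if PySem.List.pyGetD s (j + 1) 0 > PySem.List.pyGetD s j 0
      then PySem.List.pySetD s j (PySem.List.pyGetD s (j + 1) 0) else s) a
    = pvSufMax a := by
  match ha : a with
  | [] => rfl
  | [x] => rfl
  | x :: y :: t =>
    have h2 : 2 ≤ a.length := by rw [ha]; simp only [List.length_cons]; omega
    rw [← ha]
    have hcast : (a.length : Int) - 2 = ((a.length - 2 : Nat) : Int) := by omega
    have hinit : a = a.take (a.length - 2 + 1) ++ pvSufMax (a.drop (a.length - 2 + 1)) := by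
      have hlt : a.length - 1 < a.length := by omega
      have hd : a.drop (a.length - 2 + 1) = [a[a.length - 1]] := by
        rw [show a.length - 2 + 1 = a.length - 1 by omega,
          List.drop_eq_getElem_cons hlt, List.drop_of_length_le (by omega)]
      rw [hd]
      show a = a.take (a.length - 2 + 1) ++ pvSufMax [a[a.length - 1]]
      rw [show pvSufMax [a[a.length - 1]] = [a[a.length - 1]] from rfl, ← hd,
        List.take_append_drop]
    have hloop := smaxLoop a (a.length - 2) (by omega)
    rw [← hinit] at hloop
    rw [hcast]
    exact hloop

theorem map_range_zipWith (xs ys : List Int) (n : Nat) (hx : xs.length = n)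
    (hy : ys.length = n) :
    (PySem.List.pyRange 0 (n : Int) 1).map (fun i =>
      PySem.Int.bxor (PySem.List.pyGetD xs i 0) (PySem.List.pyGetD ys i 0))
    = List.zipWith PySem.Int.bxor xs ys := by
  apply List.ext_getElem
  · simp [PySem.List.length_pyRange_one, hx, hy]
  · intro k hk1 hk2
    have hkn : k < n := by simpa [PySem.List.length_pyRange_one] using hk1
    rw [List.getElem_map, PySem.List.getElem_pyRange_one, zero_add,
      PySem.List.pyGetD_natCast, PySem.List.pyGetD_natCast, List.getElem_zipWith,
      List.getD_eq_getElem?_getD, List.getElem?_eq_getElem (by omega),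
      List.getD_eq_getElem?_getD, List.getElem?_eq_getElem (by omega)]
    rfl

-- ===== VERDICT (by name: the statement is the Claim_ definition above) =====
theorem get_next_state_spec : Claim_equal_get_next_state := by
  intro a _
  show get_next_state a = get_next_state_alt a
  simp only [get_next_state, get_next_state_alt]
  rw [pmin_fold, smax_fold,
    map_range_zipWith _ _ a.length (length_pvScanMin a none) (length_pvSufMax a),
    pvGo_eq, pvSufMaxC_none]
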